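-- pv_equiv track=rewrite | github.com/Hyunul/Algorithm | 프로그래머스/1/82612. 부족한 금액 계산하기/부족한 금액 계산하기.py | solution
-- ===== SOURCE A (Python) =====
-- def solution(price, money, count):
--     total = 0
--     for i in range(1, count+1):
--         total += price * i
--     if total > money:
--         answer = total - money
--     else:
--         answer = 0
--     return answer
-- ===== SOURCE B (Python) =====
-- def solution(price, money, count):
--     n = count if count > 0 else 0
--     total = price * (n * (n + 1) // 2)
--     deficit = total - money
--     return deficit if deficit > 0 else 0
-- ===== Notes on version B (the rewrite author's own statement) =====
-- stated objective: faster
-- what changed: Replaced the O(count) accumulation loop with the closed-form arithmetic-series formula price*count*(count+1)//2.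
import Mathlib
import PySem

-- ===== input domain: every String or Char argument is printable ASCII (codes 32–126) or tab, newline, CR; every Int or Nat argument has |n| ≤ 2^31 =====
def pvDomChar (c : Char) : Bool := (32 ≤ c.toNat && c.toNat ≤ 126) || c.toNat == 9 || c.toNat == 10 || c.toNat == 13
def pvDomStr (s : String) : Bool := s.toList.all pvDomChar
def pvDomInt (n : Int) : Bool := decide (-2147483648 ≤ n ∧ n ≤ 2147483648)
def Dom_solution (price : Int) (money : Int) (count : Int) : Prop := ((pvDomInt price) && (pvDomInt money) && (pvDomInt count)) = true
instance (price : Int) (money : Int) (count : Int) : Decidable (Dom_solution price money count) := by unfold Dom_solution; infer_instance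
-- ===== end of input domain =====

-- B replaces A's O(count) accumulation loop by the closed-form series price*count*(count+1)//2 (O(1)).

-- ===== PORT A =====
def solution (price : Int) (money : Int) (count : Int) : Int :=
  let total := (PySem.List.pyRange 1 (count + 1) 1).foldl (fun t i => t + price * i) 0
  if total > money then total - money else 0

-- ===== PORT B =====
def solution_alt (price : Int) (money : Int) (count : Int) : Int :=
  let n := if count > 0 then count else 0
  let total := price * PySem.Int.floordiv (n * (n + 1)) 2
  let deficit := total - money
  if deficit > 0 then deficit else 0

-- ===== PRECONDITION & SPEC =====
def Spec_solution (price : Int) (money : Int) (count : Int) (out : Int) : Prop := out = solution_alt price money count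
instance (price : Int) (money : Int) (count : Int) (out : Int) : Decidable (Spec_solution price money count out) := by unfold Spec_solution; infer_instance

-- ===== CLAIM (what is proved, stated in full; the proofs are below) =====
def Claim_equal_solution : Prop := ∀ (price : Int) (money : Int) (count : Int), Dom_solution price money count → Spec_solution price money count (solution price money count)

-- ===== LEMMAS AND PROOFS =====

-- 2 × (A's loop total for count = n) = price * n * (n+1)
lemma pv_loop_double (price : Int) : ∀ (n : Nat),
    2 * ((PySem.List.pyRange 1 ((n : Int) + 1) 1).foldl (fun t i => t + price * i) 0)
      = price * ((n : Int) * ((n : Int) + 1)) := by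
  intro n
  induction n with
  | zero =>
      simp [PySem.List.pyRange_one_eq_nil]
  | succ k ih =>
      have h : PySem.List.pyRange 1 (((k : Int) + 1) + 1) 1
          = PySem.List.pyRange 1 ((k : Int) + 1) 1 ++ [(k : Int) + 1] :=
        PySem.List.pyRange_one_succ_right (by omega)
      push_cast
      rw [h, List.foldl_append]
      simp only [List.foldl]
      ring_nf
      ring_nf at ih
      linarith [ih]

-- A's loop total equals B's closed form, for any Int count
lemma pv_total_eq (price count : Int) :
    (PySem.List.pyRange 1 (count + 1) 1).foldl (fun t i => t + price * i) 0
      = price * PySem.Int.floordiv ((if count > 0 then count else 0) * ((if count > 0 then count else 0) + 1)) 2 := by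
  by_cases hc : count > 0
  · simp only [hc, if_pos]
    set n : Nat := count.toNat with hn
    have hcn : count = (n : Int) := by omega
    rw [hcn]
    have h2 := pv_loop_double price n
    -- n*(n+1) is even: write it as 2*k
    obtain ⟨k, hk⟩ : ∃ k : Int, (n : Int) * ((n : Int) + 1) = 2 * k := by
      rcases Int.even_mul_succ_self (n : Int) with ⟨k, hk⟩
      exact ⟨k, by omega⟩
    have hfd : PySem.Int.floordiv ((n : Int) * ((n : Int) + 1)) 2 = k := by
      rw [hk, PySem.Int.floordiv_eq_ediv_of_pos (by norm_num)]
      omega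
    rw [hfd]
    have : 2 * ((PySem.List.pyRange 1 ((n : Int) + 1) 1).foldl (fun t i => t + price * i) 0)
        = 2 * (price * k) := by rw [h2, hk]; ring
    omega
  · have hnil : PySem.List.pyRange 1 (count + 1) 1 = [] :=
      PySem.List.pyRange_one_eq_nil (by omega)
    simp [hnil, hc, PySem.Int.floordiv]

-- ===== VERDICT (by name: the statement is the Claim_ definition above) =====
theorem solution_spec : Claim_equal_solution := by
  intro price money count _
  unfold Spec_solution solution solution_alt
  simp only []
  rw [pv_total_eq price count]
  split_ifs <;> omega
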